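-- pv_equiv track=rewrite | github.com/danimancilla/Diploma-Python-aplicado-a-la-Ciencia-de-Datos | Programación y Estructuras en Python/LAB 2/P1.py | contarTLD
-- ===== SOURCE A (Python) =====
-- def contarTLD(correos):
--     diccionario={}
--     for elemento in correos:
--         indice=elemento.rfind(".")
--         tld=elemento[indice+1:]
--         if tld in diccionario:
--             diccionario[tld] +=1
--         else:
--             diccionario[tld] =1
--     return diccionario
-- ===== SOURCE B (Python) =====
-- def contarTLD(correos):
--     tlds = [c[c.rfind(".") + 1:] for c in correos]
--     return {t: tlds.count(t) for t in tlds}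
-- ===== Notes on version B (the rewrite author's own statement) =====
-- stated objective: simpler
-- what changed: Replaces the running-accumulator dict (membership test + increment vs first insert per element) with a map-then-count decomposition: extract all TLDs once, then a dict comprehension keyed by each TLD with its total list count.
import Mathlib
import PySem

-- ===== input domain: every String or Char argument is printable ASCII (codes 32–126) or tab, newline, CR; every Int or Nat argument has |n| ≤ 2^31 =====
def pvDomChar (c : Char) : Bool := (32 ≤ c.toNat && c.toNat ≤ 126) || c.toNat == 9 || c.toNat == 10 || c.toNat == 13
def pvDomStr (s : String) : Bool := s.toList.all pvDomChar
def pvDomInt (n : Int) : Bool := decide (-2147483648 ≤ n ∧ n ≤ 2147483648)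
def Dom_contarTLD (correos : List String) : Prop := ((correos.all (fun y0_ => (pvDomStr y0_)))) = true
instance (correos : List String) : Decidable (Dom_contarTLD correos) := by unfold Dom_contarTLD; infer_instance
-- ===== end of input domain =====

-- B replaces A's running-count dict with a map-then-count decomposition (simpler; same results).

-- ===== PORT A =====
def contarTLD (correos : List String) : List (String × Int) :=
  (correos.foldl (fun diccionario elemento =>
      let indice : Int := PySem.Str.rfind elemento "."
      let tld : String := String.ofList (PySem.List.slice elemento.toList (some (indice + 1)) none)
      if diccionario.contains tld then
        diccionario.modify tld 0 (· + 1)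
      else
        diccionario.insert tld 1)
    PySem.Dict.empty).items

-- ===== PORT B =====
def contarTLD_alt (correos : List String) : List (String × Int) :=
  let tlds : List String := correos.map (fun c =>
    String.ofList (PySem.List.slice c.toList (some (PySem.Str.rfind c "." + 1)) none))
  (tlds.foldl (fun d t => d.insert t ((tlds.count t : Int))) PySem.Dict.empty).items

-- ===== PRECONDITION & SPEC =====
def Spec_contarTLD (correos : List String) (out : List (String × Int)) : Prop := out = contarTLD_alt correos
instance (correos : List String) (out : List (String × Int)) : Decidable (Spec_contarTLD correos out) := by unfold Spec_contarTLD; infer_instance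

-- ===== CLAIM (what is proved, stated in full; the proofs are below) =====
def Claim_equal_contarTLD : Prop := ∀ (correos : List String), Dom_contarTLD correos → Spec_contarTLD correos (contarTLD correos)

-- ===== LEMMAS AND PROOFS =====

-- A's loop body: the explicit membership test collapses to an unconditional Counter step.
lemma contarTLD_step_eq (d : PySem.Dict String Int) (t : String) :
    (if d.contains t then d.modify t 0 (· + 1) else d.insert t 1) = d.modify t 0 (· + 1) := by
  by_cases h : d.contains t
  · simp [h]
  · simp only [Bool.not_eq_true] at h
    simp only [h, Bool.false_eq_true, if_false, PySem.Dict.insert, PySem.Dict.modify]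
    simp [PySem.Dict.getD_of_not_contains _ _ h]

lemma items_foldl_insert_const (v : String → Int) (l : List String) :
    (l.foldl (fun d x => d.insert x (v x)) PySem.Dict.empty).items =
      (PySem.Set.ofList l).map (fun k => (k, v k)) := by
  induction l using List.reverseRecOn with
  | nil => rfl
  | append_singleton l x ih =>
    rw [List.foldl_append, List.foldl_cons, List.foldl_nil, PySem.Set.ofList_append_singleton]
    have hkeys : (l.foldl (fun d x => d.insert x (v x)) PySem.Dict.empty).keys
        = PySem.Set.ofList l := by
      rw [PySem.Dict.keys_foldl_insert]
      simp [PySem.Set.update_nil_left]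
    by_cases hx : x ∈ l
    · have hc : (l.foldl (fun d x => d.insert x (v x)) PySem.Dict.empty).contains x = true := by
        rw [PySem.Dict.contains_iff_mem_keys, hkeys]
        exact (PySem.Set.mem_ofList _ _).mpr hx
      rw [PySem.Dict.items_insert_of_contains _ _ hc, ih, PySem.Set.add_of_mem
        ((PySem.Set.mem_ofList _ _).mpr hx), List.map_map]
      refine List.map_congr_left fun k _ => ?_
      by_cases hk : k = x
      · subst hk; simp
      · simp [Function.comp, hk]
    · have hc : (l.foldl (fun d x => d.insert x (v x)) PySem.Dict.empty).contains x = false := by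
        rw [← Bool.not_eq_true, PySem.Dict.contains_iff_mem_keys, hkeys]
        simp [PySem.Set.mem_ofList, hx]
      rw [PySem.Dict.items_insert_of_not_contains _ _ hc, ih, PySem.Set.add_of_not_mem
        (by simp [PySem.Set.mem_ofList, hx]), List.map_append]
      rfl

-- ===== VERDICT (by name: the statement is the Claim_ definition above) =====
theorem contarTLD_spec : Claim_equal_contarTLD := by
  intro correos _
  show contarTLD correos = contarTLD_alt correos
  unfold contarTLD contarTLD_alt
  have hfun : (fun (diccionario : PySem.Dict String Int) (elemento : String) =>
      let indice : Int := PySem.Str.rfind elemento "."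
      let tld : String := String.ofList (PySem.List.slice elemento.toList (some (indice + 1)) none)
      if diccionario.contains tld then diccionario.modify tld 0 (· + 1)
      else diccionario.insert tld 1)
      = (fun (d : PySem.Dict String Int) (elemento : String) =>
          d.modify (String.ofList (PySem.List.slice elemento.toList
            (some (PySem.Str.rfind elemento "." + 1)) none)) 0 (· + 1)) :=
    funext fun d => funext fun e => contarTLD_step_eq d _
  rw [hfun, ← List.foldl_map (f := fun c =>
      String.ofList (PySem.List.slice c.toList (some (PySem.Str.rfind c "." + 1)) none))
      (g := fun (d : PySem.Dict String Int) t => d.modify t 0 (· + 1)),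
    ← PySem.Dict.counter_eq_foldl, PySem.Dict.items_counter,
    items_foldl_insert_const]
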